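-- pv_equiv track=rewrite | github.com/omfagbile/FoldingCurves | foldingcurves/squaregrid.py | end_squaregrid_word
-- ===== SOURCE A (Python) =====
-- def end_squaregrid_word(word: str) -> tuple[int, int]:
--     """
--     Compute the integer endpoint of a square-grid word over {A,B,+,-}.
--     '+' = left 90°, '-' = right 90°, 'A'/'B' = step forward.
--     Returns (x, y) as integers.
--     """
--     x, y = 0, 0
--     dir = 0 # direction: 0 = West, 1 = North, 2 = East, 3 = South
--     for cmd in word:
--         if cmd in "AB":
--             if dir == 0:   x += 1
--             elif dir == 1: y += 1
--             elif dir == 2: x -= 1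
--             else: y -= 1
--         elif cmd == '+':
--             dir = (dir - 1) % 4
--         elif cmd == '-':
--             dir = (dir + 1) % 4
--     return x, y
-- ===== SOURCE B (Python) =====
-- def _rot(r, v):
--     """Rotate vector v by r quarter-turns counterclockwise."""
--     x, y = v
--     for _ in range(r % 4):
--         x, y = -y, x
--     return (x, y)
--
--
-- def _seg(s):
--     """Summarise a word segment as (displacement, net quarter-turns),
--     assuming the initial heading (1, 0); segments combine like a monoid:
--     (d1, r1) * (d2, r2) = (d1 + rot(r1, d2), (r1 + r2) % 4)."""
--     if len(s) == 0:
--         return ((0, 0), 0)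
--     if len(s) == 1:
--         c = s
--         if c in "AB":
--             return ((1, 0), 0)
--         if c == '+':
--             return ((0, 0), 3)
--         if c == '-':
--             return ((0, 0), 1)
--         return ((0, 0), 0)
--     m = len(s) // 2
--     d1, r1 = _seg(s[:m])
--     d2, r2 = _seg(s[m:])
--     e = _rot(r1, d2)
--     return ((d1[0] + e[0], d1[1] + e[1]), (r1 + r2) % 4)
--
--
-- def end_squaregrid_word(word: str) -> tuple[int, int]:
--     """Endpoint of a square-grid word, by divide and conquer: each half is
--     summarised as (displacement, net rotation) and the summaries are
--     composed, instead of threading a turtle state through one pass."""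
--     return _seg(word)[0]
-- ===== Notes on version B (the rewrite author's own statement) =====
-- stated objective: alternative
-- what changed: Replaces A's single left-to-right turtle pass (threading position and a 0-3 direction index through every character) by a divide-and-conquer: each half of the word is summarised as a (displacement, net quarter-turn) pair and the two summaries are composed monoid-style with a vector rotation.
import Mathlib
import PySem

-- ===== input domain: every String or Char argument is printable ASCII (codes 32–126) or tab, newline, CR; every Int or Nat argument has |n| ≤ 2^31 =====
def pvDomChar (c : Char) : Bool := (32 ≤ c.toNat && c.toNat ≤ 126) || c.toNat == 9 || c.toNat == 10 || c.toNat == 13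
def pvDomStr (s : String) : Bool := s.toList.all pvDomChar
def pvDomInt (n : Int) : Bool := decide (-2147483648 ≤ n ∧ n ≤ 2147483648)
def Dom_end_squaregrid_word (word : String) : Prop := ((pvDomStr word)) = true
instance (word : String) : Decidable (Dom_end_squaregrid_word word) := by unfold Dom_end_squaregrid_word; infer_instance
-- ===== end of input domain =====

-- B replaces A's single left-to-right turtle pass by divide and conquer: each half of the
-- word is summarised as (displacement, net rotation) and the summaries are composed
-- monoid-style (objective: alternative algorithm, same asymptotic cost up to a log factor).

-- ===== PORT A =====
-- state: (x, y, dir)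
def end_squaregrid_word_step (st : Int × Int × Int) (cmd : Char) : Int × Int × Int :=
  let (x, y, dir) := st
  if "AB".toList.contains cmd then
    if dir = 0 then (x + 1, y, dir)
    else if dir = 1 then (x, y + 1, dir)
    else if dir = 2 then (x - 1, y, dir)
    else (x, y - 1, dir)
  else if cmd = '+' then (x, y, PySem.Int.mod (dir - 1) 4)
  else if cmd = '-' then (x, y, PySem.Int.mod (dir + 1) 4)
  else (x, y, dir)

def end_squaregrid_word (word : String) : Int × Int :=
  let st := word.toList.foldl end_squaregrid_word_step (0, 0, 0)
  (st.1, st.2.1)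

-- ===== PORT B =====
-- _rot: rotate v by r quarter-turns counterclockwise (the Python loop over range(r % 4))
def pvRot (r : Int) (v : Int × Int) : Int × Int :=
  (List.range (PySem.Int.mod r 4).toNat).foldl (fun p _ => (-p.2, p.1)) v

-- _seg: summarise a segment as (displacement, net quarter-turns); halves are combined by
-- (d1, r1) * (d2, r2) = (d1 + rot(r1, d2), (r1 + r2) % 4)
def pvSeg : List Char → (Int × Int) × Int
  | [] => ((0, 0), 0)
  | [c] =>
    if "AB".toList.contains c then ((1, 0), 0)
    else if c = '+' then ((0, 0), 3)
    else if c = '-' then ((0, 0), 1)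
    else ((0, 0), 0)
  | a :: b :: rest =>
    let l := a :: b :: rest
    let m := l.length / 2
    let s1 := pvSeg (l.take m)
    let s2 := pvSeg (l.drop m)
    let e := pvRot s1.2 s2.1
    ((s1.1.1 + e.1, s1.1.2 + e.2), PySem.Int.mod (s1.2 + s2.2) 4)
termination_by l => l.length
decreasing_by
  · simp [List.length_take]; omega
  · simp [List.length_drop]; omega

def end_squaregrid_word_alt (word : String) : Int × Int :=
  (pvSeg word.toList).1

-- ===== PRECONDITION & SPEC =====
def Spec_end_squaregrid_word (word : String) (out : Int × Int) : Prop := out = end_squaregrid_word_alt word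
instance (word : String) (out : Int × Int) : Decidable (Spec_end_squaregrid_word word out) := by unfold Spec_end_squaregrid_word; infer_instance

-- ===== CLAIM (what is proved, stated in full; the proofs are below) =====
def Claim_equal_end_squaregrid_word : Prop := ∀ (word : String), Dom_end_squaregrid_word word → Spec_end_squaregrid_word word (end_squaregrid_word word)

-- ===== LEMMAS AND PROOFS =====

-- one quarter-turn, abstracted for the proofs
def pvG (p : Int × Int) : Int × Int := (-p.2, p.1)

theorem pvRot_eq_iter (r : Int) (v : Int × Int) :
    pvRot r v = pvG^[(PySem.Int.mod r 4).toNat] v := by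
  unfold pvRot
  generalize (PySem.Int.mod r 4).toNat = n
  induction n with
  | zero => simp
  | succ n ih =>
      rw [List.range_succ, List.foldl_append, ih, Function.iterate_succ_apply']
      rfl

theorem pvG_iter_zero (n : Nat) : pvG^[n] (0, 0) = (0, 0) := by
  induction n with
  | zero => rfl
  | succ n ih => rw [Function.iterate_succ_apply', ih]; rfl

theorem pvG_iter_four (n : Nat) (v : Int × Int) : pvG^[n + 4] v = pvG^[n] v := by
  rw [Function.iterate_add_apply]
  obtain ⟨a, b⟩ := v
  simp [pvG]

theorem pvG_iter_add (n : Nat) (a b : Int × Int) :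
    pvG^[n] (a.1 + b.1, a.2 + b.2) = ((pvG^[n] a).1 + (pvG^[n] b).1, (pvG^[n] a).2 + (pvG^[n] b).2) := by
  induction n with
  | zero => rfl
  | succ n ih =>
      rw [Function.iterate_succ_apply', Function.iterate_succ_apply', Function.iterate_succ_apply', ih]
      simp [pvG]; ring

theorem pvSeg_rot_range (l : List Char) : 0 ≤ (pvSeg l).2 ∧ (pvSeg l).2 < 4 := by
  induction l using pvSeg.induct with
  | case6 a b rest ih1 ih2 =>
      unfold pvSeg
      exact ⟨PySem.Int.mod_nonneg _ (by norm_num), PySem.Int.mod_lt _ (by norm_num)⟩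
  | _ => simp [pvSeg]; try split_ifs <;> norm_num

theorem pvMain (l : List Char) : ∀ x y d : Int, 0 ≤ d → d < 4 →
    l.foldl end_squaregrid_word_step (x, y, d) =
      (x + (pvG^[d.toNat] (pvSeg l).1).1, y + (pvG^[d.toNat] (pvSeg l).1).2,
        PySem.Int.mod (d + (pvSeg l).2) 4) := by
  induction l using pvSeg.induct with
  | case1 =>
      intro x y d h0 h4
      simp [pvSeg, pvG_iter_zero]
      omega
  | case2 c hc =>
      intro x y d h0 h4
      have hc' : c = 'A' ∨ c = 'B' := by simpa using hc
      obtain rfl | rfl | rfl | rfl : d = 0 ∨ d = 1 ∨ d = 2 ∨ d = 3 := by omega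
      all_goals rcases hc' with rfl | rfl <;>
        simp [end_squaregrid_word_step, pvSeg, pvG, PySem.Int.mod] <;> omega
  | case3 h =>
      intro x y d h0 h4
      obtain rfl | rfl | rfl | rfl : d = 0 ∨ d = 1 ∨ d = 2 ∨ d = 3 := by omega
      all_goals simp [end_squaregrid_word_step, pvSeg, pvG, PySem.Int.mod]
  | case4 h h' =>
      intro x y d h0 h4
      obtain rfl | rfl | rfl | rfl : d = 0 ∨ d = 1 ∨ d = 2 ∨ d = 3 := by omega
      all_goals simp [end_squaregrid_word_step, pvSeg, pvG, PySem.Int.mod]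
  | case5 c hc h1 h2 =>
      intro x y d h0 h4
      have hc' : ¬ (c = 'A' ∨ c = 'B') := by simpa using hc
      obtain rfl | rfl | rfl | rfl : d = 0 ∨ d = 1 ∨ d = 2 ∨ d = 3 := by omega
      all_goals simp [end_squaregrid_word_step, pvSeg, pvG, hc', h1, h2, PySem.Int.mod]
  | case6 a b rest l m ih1 ih2 =>
      intro x y d h0 h4
      simp only [show l = a :: b :: rest from rfl] at ih1 ih2
      set t := List.take m (a :: b :: rest) with ht
      set u := List.drop m (a :: b :: rest) with hu
      have hsplit : (a :: b :: rest) = t ++ u := (List.take_append_drop m _).symm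
      obtain ⟨hr1a, hr1b⟩ := pvSeg_rot_range t
      obtain ⟨hr2a, hr2b⟩ := pvSeg_rot_range u
      set D1 := (pvSeg t).1
      set r1 := (pvSeg t).2
      set D2 := (pvSeg u).1
      set r2 := (pvSeg u).2
      have hd' : PySem.Int.mod (d + r1) 4 = (d + r1) % 4 :=
        PySem.Int.mod_eq_emod_of_pos (by norm_num)
      have step1 : (a :: b :: rest).foldl end_squaregrid_word_step (x, y, d) =
          u.foldl end_squaregrid_word_step (x + (pvG^[d.toNat] D1).1, y + (pvG^[d.toNat] D1).2,
            PySem.Int.mod (d + r1) 4) := by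
        conv_lhs => rw [hsplit]
        rw [List.foldl_append, ih1 x y d h0 h4]
      have hstate : u.foldl end_squaregrid_word_step (x + (pvG^[d.toNat] D1).1,
            y + (pvG^[d.toNat] D1).2, PySem.Int.mod (d + r1) 4) =
          (x + (pvG^[d.toNat] D1).1 + (pvG^[(PySem.Int.mod (d + r1) 4).toNat] D2).1,
           y + (pvG^[d.toNat] D1).2 + (pvG^[(PySem.Int.mod (d + r1) 4).toNat] D2).2,
           PySem.Int.mod (PySem.Int.mod (d + r1) 4 + r2) 4) :=
        ih2 _ _ _ (PySem.Int.mod_nonneg _ (by norm_num)) (PySem.Int.mod_lt _ (by norm_num))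
      -- the rotated exponent agrees with d.toNat + r1.toNat up to the period 4
      have hexp : pvG^[(PySem.Int.mod (d + r1) 4).toNat] D2 = pvG^[d.toNat + r1.toNat] D2 := by
        rw [hd']
        by_cases hlt : d + r1 < 4
        · have : (d + r1) % 4 = d + r1 := by omega
          rw [this]
          congr 1
          omega
        · have hmod : (d + r1) % 4 = d + r1 - 4 := by omega
          have hn : d.toNat + r1.toNat = ((d + r1 - 4) % 4).toNat + 4 := by omega
          rw [hmod, hn, pvG_iter_four]
          congr 1
          omega
      -- pvSeg of the whole list, unfolded once
      have hseg : pvSeg (a :: b :: rest) =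
          ((D1.1 + (pvRot r1 D2).1, D1.2 + (pvRot r1 D2).2), PySem.Int.mod (r1 + r2) 4) := by
        conv_lhs => rw [pvSeg]
      have hrot : pvRot r1 D2 = pvG^[r1.toNat] D2 := by
        rw [pvRot_eq_iter]
        congr 2
        rw [PySem.Int.mod_eq_emod_of_pos (by norm_num)]
        omega
      rw [step1, hstate, hseg, hrot]
      have hadd := pvG_iter_add d.toNat (D1.1, D1.2) ((pvG^[r1.toNat] D2).1, (pvG^[r1.toNat] D2).2)
      simp only at hadd
      have hiter : pvG^[d.toNat] (pvG^[r1.toNat] D2) = pvG^[d.toNat + r1.toNat] D2 :=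
        (Function.iterate_add_apply pvG d.toNat r1.toNat D2).symm
      refine Prod.ext ?_ (Prod.ext ?_ ?_) <;> simp only
      · rw [hadd, hiter, hexp]; ring
      · rw [hadd, hiter, hexp]; ring
      · simp only [PySem.Int.mod_eq_emod_of_pos (b := 4) (by norm_num : (0:Int) < 4)]
        omega

-- ===== VERDICT (by name: the statement is the Claim_ definition above) =====
theorem end_squaregrid_word_spec : Claim_equal_end_squaregrid_word := by
  intro word _
  unfold Spec_end_squaregrid_word end_squaregrid_word end_squaregrid_word_alt
  rw [pvMain word.toList 0 0 0 (by norm_num) (by norm_num)]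
  simp
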